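-- pv_equiv track=rewrite | github.com/oliviernguyenquoc/advent-of-code | 2023/day13/day13.py | vertical_comparison_with_smudge
-- ===== SOURCE A (Python) =====
-- def vertical_comparison_with_smudge(figure: list[str], x: int) -> bool:
--     len_x = len(figure[0])
--     part1 = []
--     part2 = []
--
--     nb_diff = 0
--     for y in range(len(figure)):
--         if x <= len_x // 2:
--             tmp1 = figure[y][:x]
--             tmp2 = figure[y][x : 2 * x][::-1]
--             if tmp1 != tmp2:
--                 nb_diff += 1
--             part1.append(tmp1)
--             part2.append(tmp2)
--         else:
--             tmp1 = figure[y][2 * x - len_x : x]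
--             tmp2 = figure[y][x:][::-1]
--             if tmp1 != tmp2:
--                 nb_diff += 1
--             part1.append(tmp1)
--             part2.append(tmp2)
--
--         if nb_diff > 1:
--             return False
--
--     if nb_diff != 1:
--         return False
--     else:
--         return (
--             sum(
--                 [
--                     i != j
--                     for line1, line2 in zip(part1, part2)
--                     for i, j in zip(line1, line2)
--                 ]
--             )
--             == 1
--         )
-- ===== SOURCE B (Python) =====
-- def vertical_comparison_with_smudge(figure: list[str], x: int) -> bool:
--     len_x = len(figure[0])
--     bad = None  # char-diff count of the unique mismatching row, if any
--     for row in figure: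
--         if x <= len_x // 2:
--             t1 = row[:x]
--             t2 = row[x : 2 * x][::-1]
--         else:
--             t1 = row[2 * x - len_x : x]
--             t2 = row[x:][::-1]
--         if t1 != t2:
--             if bad is not None:
--                 return False
--             bad = sum(a != b for a, b in zip(t1, t2))
--     return bad == 1
-- ===== Notes on version B (the rewrite author's own statement) =====
-- stated objective: simpler
-- what changed: B drops A's part1/part2 accumulation lists and the final double comprehension: it keeps only the char-diff count of the first mismatching row (rows that match contribute nothing), returns False on a second mismatching row, and finally checks that single count equals 1.
import Mathlib
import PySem

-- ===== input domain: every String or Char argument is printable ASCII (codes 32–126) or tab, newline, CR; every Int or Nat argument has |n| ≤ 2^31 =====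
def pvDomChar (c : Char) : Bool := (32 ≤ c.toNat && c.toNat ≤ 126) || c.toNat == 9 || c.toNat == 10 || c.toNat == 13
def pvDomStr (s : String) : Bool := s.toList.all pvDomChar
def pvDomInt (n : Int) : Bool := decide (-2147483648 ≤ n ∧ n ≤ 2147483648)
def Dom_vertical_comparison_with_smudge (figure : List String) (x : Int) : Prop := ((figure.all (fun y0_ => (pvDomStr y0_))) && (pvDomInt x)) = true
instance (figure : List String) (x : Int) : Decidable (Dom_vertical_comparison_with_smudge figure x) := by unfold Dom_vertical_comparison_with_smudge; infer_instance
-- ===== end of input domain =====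

-- B drops A's part1/part2 lists and the final double comprehension, keeping only the
-- char-diff count of the first mismatching row (objective: simpler, same asymptotic cost).

-- ===== PORT A =====
-- the two slices tmp1/tmp2 computed for one row (identical code in both Pythons)
def pvSlicesA (lenx x : Int) (row : String) : List Char × List Char :=
  if x ≤ PySem.Int.floordiv lenx 2 then
    (PySem.List.slice row.toList none (some x),
     (PySem.List.slice row.toList (some x) (some (2 * x))).reverse)
  else
    (PySem.List.slice row.toList (some (2 * x - lenx)) (some x),
     (PySem.List.slice row.toList (some x) none).reverse)

-- the for-loop of A: state (nb_diff, part1, part2); 'none' = the early 'return False'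
def pvLoopA (lenx x : Int) (rows : List String) (nb : Int)
    (p1 p2 : List (List Char)) : Option (Int × List (List Char) × List (List Char)) :=
  match rows with
  | [] => some (nb, p1, p2)
  | r :: rest =>
    let t := pvSlicesA lenx x r
    let nb' := if t.1 ≠ t.2 then nb + 1 else nb
    if nb' > 1 then none
    else pvLoopA lenx x rest nb' (p1 ++ [t.1]) (p2 ++ [t.2])

-- sum([i != j for line1, line2 in zip(part1, part2) for i, j in zip(line1, line2)])
def pvSumA (p1 p2 : List (List Char)) : Int :=
  ((p1.zip p2).flatMap (fun pr => (pr.1.zip pr.2).map (fun cc => decide (cc.1 ≠ cc.2)))).foldl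
    (fun s b => s + (if b then 1 else 0)) 0

def vertical_comparison_with_smudge (figure : List String) (x : Int) : Bool :=
  match PySem.List.pyGet? figure 0 with
  | none => false  -- figure[0] raises IndexError; excluded by Pre_
  | some r0 =>
    let lenx : Int := r0.toList.length
    match pvLoopA lenx x figure 0 [] [] with
    | none => false
    | some (nb, p1, p2) =>
      if nb ≠ 1 then false else pvSumA p1 p2 == 1

-- ===== PORT B =====
def pvSlicesB (lenx x : Int) (row : String) : List Char × List Char :=
  if x ≤ PySem.Int.floordiv lenx 2 then
    (PySem.List.slice row.toList none (some x),
     (PySem.List.slice row.toList (some x) (some (2 * x))).reverse)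
  else
    (PySem.List.slice row.toList (some (2 * x - lenx)) (some x),
     (PySem.List.slice row.toList (some x) none).reverse)

-- sum(a != b for a, b in zip(t1, t2))
def pvRowDiff (t1 t2 : List Char) : Int :=
  (t1.zip t2).foldl (fun s cc => s + (if cc.1 ≠ cc.2 then 1 else 0)) 0

-- the for-loop of B: state 'bad'; 'none' (outer) = the early 'return False'
def pvLoopB (lenx x : Int) (rows : List String) (bad : Option Int) : Option (Option Int) :=
  match rows with
  | [] => some bad
  | r :: rest =>
    let t := pvSlicesB lenx x r
    if t.1 ≠ t.2 then
      match bad with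
      | some _ => none
      | none => pvLoopB lenx x rest (some (pvRowDiff t.1 t.2))
    else pvLoopB lenx x rest bad

def vertical_comparison_with_smudge_alt (figure : List String) (x : Int) : Bool :=
  match PySem.List.pyGet? figure 0 with
  | none => false  -- figure[0] raises IndexError; excluded by Pre_
  | some r0 =>
    let lenx : Int := r0.toList.length
    match pvLoopB lenx x figure none with
    | none => false
    | some bad => bad == some 1

-- ===== PRECONDITION & SPEC =====
-- Pre_ excludes only the empty figure, on which A (figure[0]) raises IndexError.
def Pre_vertical_comparison_with_smudge (figure : List String) (x : Int) : Prop := figure ≠ []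
instance (figure : List String) (x : Int) : Decidable (Pre_vertical_comparison_with_smudge figure x) := by unfold Pre_vertical_comparison_with_smudge; infer_instance

def pvWitness_vertical_comparison_with_smudge : List String × Int := (["#.#.", "#..#"], 2)

def Spec_vertical_comparison_with_smudge (figure : List String) (x : Int) (out : Bool) : Prop := out = vertical_comparison_with_smudge_alt figure x
instance (figure : List String) (x : Int) (out : Bool) : Decidable (Spec_vertical_comparison_with_smudge figure x out) := by unfold Spec_vertical_comparison_with_smudge; infer_instance

-- ===== CLAIM (what is proved, stated in full; the proofs are below) =====
def Claim_equal_vertical_comparison_with_smudge : Prop := ∀ (figure : List String) (x : Int), Dom_vertical_comparison_with_smudge figure x → Pre_vertical_comparison_with_smudge figure x → Spec_vertical_comparison_with_smudge figure x (vertical_comparison_with_smudge figure x)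

-- ===== LEMMAS AND PROOFS =====

theorem pvSlicesB_eq_A (lenx x : Int) (row : String) :
    pvSlicesB lenx x row = pvSlicesA lenx x row := rfl

theorem pvRowDiff_self (t : List Char) : pvRowDiff t t = 0 := by
  unfold pvRowDiff
  induction t with
  | nil => rfl
  | cons c cs ih => simpa [List.zip] using ih

theorem pvSumA_append (p1 p2 : List (List Char)) (h : p1.length = p2.length)
    (a b : List Char) : pvSumA (p1 ++ [a]) (p2 ++ [b]) = pvSumA p1 p2 + pvRowDiff a b := by
  unfold pvSumA pvRowDiff
  rw [List.zip_append h, List.flatMap_append]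
  rw [PySem.List.foldl_add, PySem.List.foldl_add, PySem.List.foldl_add]
  simp [List.map_append, List.map_map, Function.comp_def]

-- invariant relating A's loop state to B's
def pvInv (nb : Int) (p1 p2 : List (List Char)) (bad : Option Int) : Prop :=
  p1.length = p2.length ∧
  ((bad = none ∧ nb = 0 ∧ pvSumA p1 p2 = 0) ∨
   (∃ d, bad = some d ∧ nb = 1 ∧ pvSumA p1 p2 = d))

-- final answers computed from the loop results
def pvFinA (r : Option (Int × List (List Char) × List (List Char))) : Bool :=
  match r with
  | none => false
  | some (nb, p1, p2) => if nb ≠ 1 then false else pvSumA p1 p2 == 1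

def pvFinB (r : Option (Option Int)) : Bool :=
  match r with
  | none => false
  | some bad => bad == some 1

theorem pvLoop_agree (lenx x : Int) (rows : List String) :
    ∀ nb p1 p2 bad, pvInv nb p1 p2 bad →
      pvFinA (pvLoopA lenx x rows nb p1 p2) = pvFinB (pvLoopB lenx x rows bad) := by
  induction rows with
  | nil =>
    intro nb p1 p2 bad hinv
    rcases hinv with ⟨_, h | ⟨d, hb, hnb, hs⟩⟩
    · simp [pvLoopA, pvLoopB, pvFinA, pvFinB, h.1, h.2.1]
    · subst hb hnb
      by_cases h1 : d = 1 <;>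
        simp [pvLoopA, pvLoopB, pvFinA, pvFinB, hs, h1]
  | cons r rest ih =>
    intro nb p1 p2 bad hinv
    obtain ⟨hlen, hcase⟩ := hinv
    simp only [pvLoopA, pvLoopB, pvSlicesB_eq_A]
    set t := pvSlicesA lenx x r with ht
    by_cases hne : t.1 ≠ t.2
    · simp only [if_pos hne]
      rcases hcase with ⟨hb, hnb, hs⟩ | ⟨d, hb, hnb, hs⟩
      · subst hb hnb
        simp only [show ¬((0 : Int) + 1 > 1) by omega, if_false]
        exact ih _ _ _ _ ⟨by simp [hlen],
          Or.inr ⟨pvRowDiff t.1 t.2, rfl, rfl, by rw [pvSumA_append _ _ hlen, hs]; ring⟩⟩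
      · subst hb hnb
        simp [pvFinA, pvFinB]
    · simp only [if_neg hne]
      rw [not_not] at hne
      have hrd : pvRowDiff t.1 t.2 = 0 := by rw [hne]; exact pvRowDiff_self _
      have hs' : pvSumA (p1 ++ [t.1]) (p2 ++ [t.2]) = pvSumA p1 p2 := by
        rw [pvSumA_append _ _ hlen, hrd]; ring
      rcases hcase with ⟨hb, hnb, hs⟩ | ⟨d, hb, hnb, hs⟩
      · subst hb hnb
        simp only [show ¬((0 : Int) > 1) by omega, if_false]
        exact ih _ _ _ _ ⟨by simp [hlen], Or.inl ⟨rfl, rfl, by rw [hs', hs]⟩⟩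
      · subst hb hnb
        simp only [show ¬((1 : Int) > 1) by omega, if_false]
        exact ih _ _ _ _ ⟨by simp [hlen], Or.inr ⟨d, rfl, rfl, by rw [hs', hs]⟩⟩

-- ===== VERDICT (by name: the statement is the Claim_ definition above) =====
theorem vertical_comparison_with_smudge_spec : Claim_equal_vertical_comparison_with_smudge := by
  intro figure x _ _
  unfold Spec_vertical_comparison_with_smudge
  unfold vertical_comparison_with_smudge vertical_comparison_with_smudge_alt
  cases h0 : PySem.List.pyGet? figure 0 with
  | none => rfl
  | some r0 =>
    have := pvLoop_agree (r0.toList.length : Int) x figure 0 [] [] none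
      ⟨rfl, Or.inl ⟨rfl, rfl, rfl⟩⟩
    simpa [pvFinA, pvFinB] using this
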